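-- pv_equiv track=rewrite | github.com/DFlamis/Encriptacion | Funciones.py | split_massage
-- ===== SOURCE A (Python) =====
-- def split_massage(massage):
--     entire_mini_massage = []
--
--     mini_massage = []
--
--     micro_massage = []
--
--     massage_size = len(massage)
--
--     for n in massage:
--         size = len(mini_massage)
--         #mini_massage.append(n)
--
--         micro_massage.append(n)
--         mini_massage.append(micro_massage)
--         micro_massage = []
--
--         if size == 3:
--             massage_size = massage_size - 4
--             entire_mini_massage.append(mini_massage)
--             mini_massage = []
--
--     if massage_size < 4:
--         new_number = 4 - len(mini_massage)
--         j = 0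
--         while(j < new_number):
--             #mini_massage.append(' ')
--
--             micro_massage.append(' ')
--             mini_massage.append(micro_massage)
--
--             j = j + 1
--             micro_massage = []
--         entire_mini_massage.append(mini_massage)
--
--     return entire_mini_massage
-- ===== SOURCE B (Python) =====
-- def split_massage(massage):
--     padded = list(massage) + [' '] * (4 - len(massage) % 4)
--     out = []
--     i = 0
--     while i < len(padded):
--         out.append([[c] for c in padded[i:i+4]])
--         i = i + 4
--     return out
-- ===== Notes on version B (the rewrite author's own statement) =====
-- stated objective: simpler
-- what changed: A builds groups character-by-character with a group-size counter and a separate trailing while-loop that pads the last group; B pads the character list up front to the next multiple of four (a full extra group when already a multiple, matching A) and then chunks it uniformly in blocks of four by index.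
import Mathlib
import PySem

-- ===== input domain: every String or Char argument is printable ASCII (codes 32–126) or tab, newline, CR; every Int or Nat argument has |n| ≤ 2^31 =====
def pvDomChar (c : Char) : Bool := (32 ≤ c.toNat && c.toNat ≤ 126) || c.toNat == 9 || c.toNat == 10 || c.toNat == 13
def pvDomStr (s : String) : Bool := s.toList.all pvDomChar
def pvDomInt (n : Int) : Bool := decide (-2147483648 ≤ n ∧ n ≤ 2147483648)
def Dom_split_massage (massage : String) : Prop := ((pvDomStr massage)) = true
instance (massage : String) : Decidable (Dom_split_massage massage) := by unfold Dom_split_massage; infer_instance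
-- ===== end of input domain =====

-- B replaces A's interleaved char-counting loop + trailing padding while-loop by a
-- pad-first-then-chunk-in-blocks-of-4 decomposition (objective: simpler).


-- ===== PORT A =====
-- A's for-loop over the characters, carrying (entire_mini_massage, mini_massage, massage_size).
def loopA (st : List (List (List String)) × List (List String) × Int) :
    List Char → List (List (List String)) × List (List String) × Int
  | [] => st
  | n :: rest =>
      let entire := st.1
      let mini := st.2.1
      let msize := st.2.2
      let size := mini.length
      -- micro_massage.append(n); mini_massage.append(micro_massage); micro_massage = []
      let mini' := mini ++ [[String.ofList [n]]]
      loopA (if size == 3 then (entire ++ [mini'], [], msize - 4) else (entire, mini', msize)) rest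

-- A's trailing while(j < new_number) padding loop.
def padWhileA (mini : List (List String)) (j new_number : Int) : List (List String) :=
  if j < new_number then padWhileA (mini ++ [[" "]]) (j + 1) new_number else mini
termination_by (new_number - j).toNat
decreasing_by omega

def split_massage (massage : String) : List (List (List String)) :=
  let st := loopA ([], [], (massage.toList.length : Int)) massage.toList
  let entire := st.1
  let mini := st.2.1
  let msize := st.2.2
  if msize < 4 then entire ++ [padWhileA mini 0 (4 - (mini.length : Int))]
  else entire

-- ===== PORT B =====
-- B's 'while i < len(padded)' loop; padded[i:i+4] is PySem.List.slice (exact).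
def loopB (padded : List String) (i : Int) : List (List (List String)) :=
  if i < (padded.length : Int) then
    ((PySem.List.slice padded (some i) (some (i + 4))).map (fun c => [c])) :: loopB padded (i + 4)
  else []
termination_by ((padded.length : Int) - i).toNat
decreasing_by omega

def split_massage_alt (massage : String) : List (List (List String)) :=
  let padded := massage.toList.map (fun c => String.ofList [c]) ++
                List.replicate (4 - massage.toList.length % 4) " "
  loopB padded 0

-- ===== PRECONDITION & SPEC =====
def Spec_split_massage (massage : String) (out : List (List (List String))) : Prop := out = split_massage_alt massage
instance (massage : String) (out : List (List (List String))) : Decidable (Spec_split_massage massage out) := by unfold Spec_split_massage; infer_instance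

-- ===== CLAIM (what is proved, stated in full; the proofs are below) =====
def Claim_equal_split_massage : Prop := ∀ (massage : String), Dom_split_massage massage → Spec_split_massage massage (split_massage massage)

-- ===== LEMMAS AND PROOFS =====

-- Proof-side helper: structural chunking in blocks of 4 (both ports are reduced to it).
def chunkB : List String → List (List (List String))
  | [] => []
  | x :: l => (((x :: l).take 4).map (fun c => [c])) :: chunkB ((x :: l).drop 4)
termination_by l => l.length
decreasing_by simp

theorem loopB_eq (padded : List String) (i : Int) (h : 0 ≤ i) :
    loopB padded i = chunkB (padded.drop i.toNat) := by
  rw [loopB.eq_def]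
  by_cases hi : i < (padded.length : Int)
  · rw [if_pos hi, loopB_eq padded (i + 4) (by omega)]
    have hne : padded.drop i.toNat ≠ [] := by
      simp only [ne_eq, List.drop_eq_nil_iff]
      omega
    obtain ⟨x, l, hx⟩ : ∃ x l, padded.drop i.toNat = x :: l :=
      List.exists_cons_of_ne_nil hne
    conv_rhs => rw [chunkB.eq_def]
    rw [hx]
    simp only [← hx]
    rw [PySem.List.slice_toNat padded h (by omega)]
    have h4 : (i + 4).toNat = i.toNat + 4 := by omega
    have ht : (i + 4).toNat - i.toNat = 4 := by omega
    rw [ht, h4, ← List.drop_drop]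
  · rw [if_neg hi]
    have : padded.drop i.toNat = [] := by
      rw [List.drop_eq_nil_iff]; omega
    rw [this, chunkB.eq_def]
termination_by ((padded.length : Int) - i).toNat
decreasing_by omega

theorem padWhileA_eq (mini : List (List String)) (j n : Int) :
    padWhileA mini j n = mini ++ List.replicate (n - j).toNat [" "] := by
  rw [padWhileA.eq_def]
  by_cases h : j < n
  · rw [if_pos h, padWhileA_eq]
    have h1 : (n - j).toNat = (n - (j + 1)).toNat + 1 := by omega
    rw [h1, List.replicate_succ]
    simp
  · rw [if_neg h]
    have : (n - j).toNat = 0 := by omega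
    simp [this]
termination_by (n - j).toNat
decreasing_by omega

theorem chunkB_cons4 (a b c d : String) (l : List String) :
    chunkB (a :: b :: c :: d :: l) = [[a], [b], [c], [d]] :: chunkB l := by
  rw [chunkB.eq_def]
  simp

-- Main invariant: A's loop started with empty mini_massage and msize = length,
-- followed by A's finishing step, equals appending B's pad-then-chunk result.
theorem main_lemma (cs : List Char) (entire : List (List (List String))) :
    (let st := loopA (entire, [], (cs.length : Int)) cs
     if st.2.2 < 4 then st.1 ++ [padWhileA st.2.1 0 (4 - (st.2.1.length : Int))] else st.1)
    = entire ++ chunkB (cs.map (fun c => String.ofList [c]) ++ List.replicate (4 - cs.length % 4) " ") := by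
  match cs with
  | [] =>
      simp only [loopA]
      norm_num [List.replicate, padWhileA_eq]
      rw [chunkB_cons4]
      simp [chunkB]
  | [a] =>
      simp only [loopA]
      norm_num [List.replicate, padWhileA_eq]
      rw [chunkB_cons4]
      simp [chunkB]
  | [a, b] =>
      simp only [loopA]
      norm_num [List.replicate, padWhileA_eq]
      rw [chunkB_cons4]
      simp [chunkB]
  | [a, b, c] =>
      simp only [loopA]
      norm_num [List.replicate, padWhileA_eq]
      rw [chunkB_cons4]
      simp [chunkB]
  | a :: b :: c :: d :: rest =>
      have step : loopA (entire, [], ((a :: b :: c :: d :: rest).length : Int)) (a :: b :: c :: d :: rest)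
          = loopA (entire ++ [[[String.ofList [a]], [String.ofList [b]], [String.ofList [c]], [String.ofList [d]]]],
                   [], (rest.length : Int)) rest := by
        simp only [loopA]
        norm_num
        have h4 : ((rest.length : Int) + 1 + 1 + 1 + 1 - 4) = (rest.length : Int) := by ring
        rw [h4]
      rw [step, main_lemma rest]
      have hlen : 4 - (a :: b :: c :: d :: rest).length % 4 = 4 - rest.length % 4 := by
        simp [List.length_cons]; omega
      rw [hlen]
      simp [chunkB_cons4]
termination_by cs.length
decreasing_by simp; omega

-- ===== VERDICT (by name: the statement is the Claim_ definition above) =====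
theorem split_massage_spec : Claim_equal_split_massage := by
  intro massage _
  unfold Spec_split_massage split_massage split_massage_alt
  rw [loopB_eq _ 0 le_rfl]
  simpa using main_lemma massage.toList []
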